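-- pv_equiv track=rewrite | github.com/Illugi317/forritun | FINAL/sum_rows_cols.py | col_sum_same
-- ===== SOURCE A (Python) =====
-- def col_sum_same(matrix): # Do not change this line
--     '''Returns the sum of the elements in each column of the matrix if the sum is the same, else 0'''
--     length = len(matrix)
--     sum_list = [] #create a list for all the sums
--     for col_num in range(0,length):
--         col_list = [nested_list[col_num] for nested_list in matrix] # create a new list that includes only the col_num. We go through the matrix list and take each nested_list[col_num] for all the nested lists
--         sum_list.append(sum(col_list))
--     if len(set(sum_list)) == 1: # We change the sum list into a set, since sets removes duplicates we can then check if the length of the set is more than 1.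
--         return sum_list[0]
--     else:
--         return 0
-- ===== SOURCE B (Python) =====
-- def col_sum_same(matrix):
--     '''Returns the sum of the elements in each column of the matrix if the sum is the same, else 0'''
--     n = len(matrix)
--     sums = [0] * n
--     for row in matrix:
--         sums = [sums[col] + row[col] for col in range(n)]
--     return sums[0] if sums and all(s == sums[0] for s in sums) else 0
-- ===== Notes on version B (the rewrite author's own statement) =====
-- stated objective: alternative
-- what changed: B accumulates all column sums in a single row-major pass over the matrix (running sums vector updated per row) instead of A's per-column comprehension that rescans the whole matrix for each column index, and tests all-equal directly instead of via a set.
import Mathlib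
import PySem

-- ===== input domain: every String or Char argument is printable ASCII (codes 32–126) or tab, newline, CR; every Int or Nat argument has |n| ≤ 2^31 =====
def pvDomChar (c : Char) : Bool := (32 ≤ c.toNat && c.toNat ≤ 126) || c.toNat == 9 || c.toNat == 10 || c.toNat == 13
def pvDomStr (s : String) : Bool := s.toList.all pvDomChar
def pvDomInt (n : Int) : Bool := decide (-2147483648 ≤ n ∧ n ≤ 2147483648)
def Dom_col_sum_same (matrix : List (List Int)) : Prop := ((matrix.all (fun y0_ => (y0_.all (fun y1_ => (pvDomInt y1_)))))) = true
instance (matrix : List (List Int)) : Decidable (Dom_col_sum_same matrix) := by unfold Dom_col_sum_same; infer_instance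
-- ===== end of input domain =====

-- B replaces A's per-column scan of the whole matrix by a single row-major pass with a running sums vector, and a direct all-equal test instead of the set test.

-- ===== PORT A =====
def col_sum_same (matrix : List (List Int)) : Int :=
  let length : Int := matrix.length
  let sum_list : List Int := (PySem.List.pyRange 0 length 1).foldl
    (fun sum_list col_num =>
      let col_list := matrix.map (fun nested_list => PySem.List.pyGetD nested_list col_num 0)
      sum_list ++ [col_list.sum]) []
  if (PySem.Set.ofList sum_list).length == 1 then PySem.List.pyGetD sum_list 0 0 else 0

-- ===== PORT B =====
def col_sum_same_alt (matrix : List (List Int)) : Int :=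
  let n := matrix.length
  let sums : List Int := matrix.foldl
    (fun sums row =>
      (List.range n).map (fun (col : Nat) =>
        PySem.List.pyGetD sums (col : Int) 0 + PySem.List.pyGetD row (col : Int) 0))
    (List.replicate n 0)
  if !sums.isEmpty && sums.all (fun s => s == PySem.List.pyGetD sums 0 0) then
    PySem.List.pyGetD sums 0 0
  else 0

-- ===== PRECONDITION & SPEC =====
-- A raises IndexError (and so does B) when some row is shorter than the number of rows; Pre_ excludes exactly those inputs.
def Pre_col_sum_same (matrix : List (List Int)) : Prop :=
  ∀ row ∈ matrix, matrix.length ≤ row.length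
instance (matrix : List (List Int)) : Decidable (Pre_col_sum_same matrix) := by
  unfold Pre_col_sum_same; infer_instance
def pvWitness_col_sum_same : List (List Int) := [[1, 2], [3, 0]]

def Spec_col_sum_same (matrix : List (List Int)) (out : Int) : Prop := out = col_sum_same_alt matrix
instance (matrix : List (List Int)) (out : Int) : Decidable (Spec_col_sum_same matrix out) := by unfold Spec_col_sum_same; infer_instance

-- ===== CLAIM (what is proved, stated in full; the proofs are below) =====
def Claim_equal_col_sum_same : Prop := ∀ (matrix : List (List Int)), Dom_col_sum_same matrix → Pre_col_sum_same matrix → Spec_col_sum_same matrix (col_sum_same matrix)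

-- ===== LEMMAS AND PROOFS =====

-- the column sum of column c
def pvColSum (m : List (List Int)) (c : Nat) : Int :=
  (m.map (fun r => PySem.List.pyGetD r (c : Int) 0)).sum

lemma pvA_sumlist (m : List (List Int)) :
    (PySem.List.pyRange 0 (m.length : Int) 1).foldl
      (fun sum_list col_num =>
        sum_list ++ [(m.map (fun r => PySem.List.pyGetD r col_num 0)).sum]) []
    = (List.range m.length).map (fun c => pvColSum m c) := by
  rw [PySem.List.foldl_append_singleton_eq_map, PySem.List.pyRange_one]
  simp [pvColSum, Function.comp]

lemma pvB_fold (m : List (List Int)) (n : Nat) (s : List Int) (hs : s.length = n) :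
    m.foldl (fun sums row =>
        (List.range n).map (fun (col : Nat) =>
          PySem.List.pyGetD sums (col : Int) 0 + PySem.List.pyGetD row (col : Int) 0)) s
    = (List.range n).map (fun c => s.getD c 0 + pvColSum m c) := by
  induction m generalizing s with
  | nil =>
    simp only [List.foldl_nil, pvColSum, List.map_nil, List.sum_nil, add_zero]
    subst hs
    apply List.ext_getElem (by simp)
    intro i h1 h2
    simp [List.getElem?_eq_getElem h1]
  | cons r rs ih =>
    rw [List.foldl_cons, ih _ (by simp)]
    apply List.map_congr_left
    intro c hc
    rw [List.mem_range] at hc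
    have : ((List.range n).map (fun (col : Nat) =>
        PySem.List.pyGetD s (col : Int) 0 + PySem.List.pyGetD r (col : Int) 0)).getD c 0
        = PySem.List.pyGetD s (c : Int) 0 + PySem.List.pyGetD r (c : Int) 0 := by
      rw [List.getD_eq_getElem _ _ (by simpa using hc)]
      simp
    rw [this]
    simp [pvColSum, PySem.List.pyGetD_natCast]
    ring

-- len(set(L)) == 1  ↔  L nonempty and all elements equal L[0]
lemma pvOfList_all_eq (x : Int) (xs : List Int) (h : ∀ y ∈ xs, y = x) :
    xs.foldl PySem.Set.add [x] = [x] := by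
  induction xs with
  | nil => rfl
  | cons a as ih =>
    have ha : a = x := h a (by simp)
    have : PySem.Set.add [x] a = [x] := by
      simp [PySem.Set.add, ha]
    rw [List.foldl_cons, this]
    exact ih (fun y hy => h y (by simp [hy]))

lemma pvSet_len_one (L : List Int) :
    ((PySem.Set.ofList L).length = 1) ↔ (L ≠ [] ∧ ∀ y ∈ L, y = L.getD 0 0) := by
  constructor
  · intro h
    have hne : L ≠ [] := by
      rintro rfl
      simp [PySem.Set.ofList] at h
    refine ⟨hne, ?_⟩
    obtain ⟨z, hz⟩ : ∃ z, PySem.Set.ofList L = [z] := by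
      match hl : PySem.Set.ofList L with
      | [z] => exact ⟨z, rfl⟩
      | [] => rw [hl] at h; simp at h
      | a :: b :: t => rw [hl] at h; simp at h
    have hmem : ∀ y ∈ L, y = z := by
      intro y hy
      have := (PySem.Set.mem_ofList (xs := L) (y := y)).mpr hy
      rw [hz] at this
      simpa using this
    intro y hy
    obtain ⟨a, as, rfl⟩ := List.exists_cons_of_ne_nil hne
    rw [hmem y hy]
    simp [hmem a (by simp)]
  · rintro ⟨hne, hall⟩
    obtain ⟨a, as, rfl⟩ := List.exists_cons_of_ne_nil hne
    simp only [List.getD_cons_zero] at hall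
    have : PySem.Set.ofList (a :: as) = [a] := by
      rw [PySem.Set.ofList_eq_foldl]
      have : PySem.Set.add [] a = [a] := by rfl
      rw [List.foldl_cons, this]
      exact pvOfList_all_eq a as (fun y hy => hall y (by simp [hy]))
    rw [this]
    rfl

-- ===== VERDICT (by name: the statement is the Claim_ definition above) =====
theorem col_sum_same_spec : Claim_equal_col_sum_same := by
  intro m _ hpre
  simp only [Spec_col_sum_same, col_sum_same, col_sum_same_alt]
  rw [pvA_sumlist, pvB_fold m m.length (List.replicate m.length 0) (by simp)]
  set L := (List.range m.length).map (fun c => pvColSum m c) with hL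
  have hLzero : (List.range m.length).map (fun c => (List.replicate m.length (0:Int)).getD c 0 + pvColSum m c) = L := by
    apply List.map_congr_left
    intro c hc
    rw [List.mem_range] at hc
    simp
  rw [hLzero]
  have hcond : ((PySem.Set.ofList L).length == 1) =
      (!L.isEmpty && L.all (fun s => s == PySem.List.pyGetD L 0 0)) := by
    rcases Bool.eq_false_or_eq_true (!L.isEmpty && L.all (fun s => s == PySem.List.pyGetD L 0 0)) with hb | hb
    · rw [hb]
      simp at hb
      rw [beq_iff_eq, pvSet_len_one]
      exact ⟨hb.1, fun y hy => by simpa [PySem.List.pyGetD_zero] using hb.2 y hy⟩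
    · rw [hb]
      simp at hb
      rw [beq_eq_false_iff_ne, Ne, pvSet_len_one]
      rintro ⟨hne, hall⟩
      obtain ⟨y, hy, hyx⟩ := hb hne
      exact hyx (by simpa [PySem.List.pyGetD_zero] using hall y hy)
  rw [hcond]
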